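-- pv_equiv track=rewrite | github.com/PiotrBlaszczykk/ASD | dynamik12.py | autostrada
-- ===== SOURCE A (Python) =====
-- def autostrada( T, k ):
--
--     n = len(T)
--
--     DP = [[None for _ in range(n)] for _ in range(k)]
--
--     DP[0][0] = sum(T)
--     for i in range(1, n):
--         DP[0][i] = DP[0][i - 1] - T[i - 1]
--
--     def licz(index, f):
--         sumy = []
--         sus = 0
--
--         for i in range(index, n):
--
--             sneed = DP[f - 1][i]
--             sumy.append(max(sus, sneed))
--             sus += T[i]
--
--         DP[f][index] = min(sumy)
--
--
--     for i in range(1, k):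
--         for j in range(n):
--             licz(j, i)
--
--     return DP[k - 1][0]
-- ===== SOURCE B (Python) =====
-- def autostrada(T, k):
--     # min over splits of T into k contiguous (possibly empty) pieces of the max piece sum,
--     # computed as the (0, n) entry of the k-th power of the one-piece cost matrix
--     # M[x][y] = P[y] - P[x] in the (min, max) semiring, by exponentiation by squaring.
--     n = len(T)
--     P = [0]
--     for t in T:
--         P.append(P[-1] + t)
--
--     def combine(A, B):
--         return [[min(max(A[x][m], B[m][y]) for m in range(x, y + 1)) if y >= x else 0
--                  for y in range(n + 1)] for x in range(n + 1)]
--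
--     def matpow(M, e):
--         if e == 1:
--             return M
--         H = matpow(M, e // 2)
--         HH = combine(H, H)
--         return HH if e % 2 == 0 else combine(HH, M)
--
--     M = [[P[y] - P[x] for y in range(n + 1)] for x in range(n + 1)]
--     return matpow(M, k)[0][n]
-- ===== Notes on version B (the rewrite author's own statement) =====
-- stated objective: alternative
-- what changed: A fills a k x n DP table layer by layer (each layer peels one piece, O(k*n^2)); B instead treats one piece as an (n+1)x(n+1) cost matrix M[x][y]=P[y]-P[x] in the (min,max) semiring and computes the (0,n) entry of M^k by exponentiation by squaring (associativity of the min-max product makes it exact, empty pieces give the semiring its diagonal).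
import Mathlib
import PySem

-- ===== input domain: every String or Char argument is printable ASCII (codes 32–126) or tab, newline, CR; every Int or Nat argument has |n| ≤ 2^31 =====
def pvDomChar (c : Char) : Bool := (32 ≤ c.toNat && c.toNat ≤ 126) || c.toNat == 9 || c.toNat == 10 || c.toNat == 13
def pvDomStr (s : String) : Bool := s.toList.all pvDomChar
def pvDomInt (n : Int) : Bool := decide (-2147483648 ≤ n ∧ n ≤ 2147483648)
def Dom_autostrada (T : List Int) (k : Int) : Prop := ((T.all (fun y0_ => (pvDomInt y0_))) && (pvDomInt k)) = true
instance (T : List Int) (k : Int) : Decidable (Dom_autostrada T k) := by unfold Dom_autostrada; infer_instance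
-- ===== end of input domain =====

-- B replaces A's layered k x n DP by exponentiation by squaring of the one-piece cost
-- matrix M[x][y] = P[y] - P[x] in the (min, max) semiring: an alternative exact algorithm.
-- Return-value equivalence only (A mutates nothing visible to the caller).

-- ===== PORT A =====
def pvSum (T : List Int) : Int := T.foldl (· + ·) 0

-- row 0: DP[0][0] = sum(T); DP[0][i] = DP[0][i-1] - T[i-1]
def pvRow0 (T : List Int) : List Int :=
  (PySem.List.pyRange 1 (T.length : Int) 1).foldl
    (fun row i => row ++ [PySem.List.pyGetD row (i - 1) 0 - PySem.List.pyGetD T (i - 1) 0])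
    [pvSum T]

-- licz(index, f): sumy/sus loop over i in range(index, n), then min(sumy)
def pvLicz (T prev : List Int) (index : Int) : Int :=
  let st := (PySem.List.pyRange index (T.length : Int) 1).foldl
    (fun (st : List Int × Int) i =>
      (st.1 ++ [max st.2 (PySem.List.pyGetD prev i 0)], st.2 + PySem.List.pyGetD T i 0))
    ([], 0)
  (PySem.List.min? st.1 (fun x => x)).getD 0

def autostrada (T : List Int) (k : Int) : Int :=
  let n : Int := T.length
  let row0 := pvRow0 T
  let last := (PySem.List.pyRange 1 k 1).foldl
    (fun prev _ => (PySem.List.pyRange 0 n 1).foldl (fun row j => row ++ [pvLicz T prev j]) [])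
    row0
  PySem.List.pyGetD last 0 0

-- ===== PORT B =====
-- matrix entry A[x][y] (indices always in range here)
def pvIx (A : List (List Int)) (x y : Int) : Int :=
  PySem.List.pyGetD (PySem.List.pyGetD A x []) y 0

-- combine(A, B): (min, max) semiring product restricted to the upper triangle
def pvCombine (n : Int) (A B : List (List Int)) : List (List Int) :=
  (PySem.List.pyRange 0 (n + 1) 1).map (fun x =>
    (PySem.List.pyRange 0 (n + 1) 1).map (fun y =>
      if x ≤ y then
        (PySem.List.min? ((PySem.List.pyRange x (y + 1) 1).map (fun m =>
          max (pvIx A x m) (pvIx B m y))) (fun z => z)).getD 0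
      else 0))

-- matpow(M, e) by squaring; Python's guard is 'e == 1' (callers pass e ≥ 1; the 'e ≤ 1'
-- form only additionally terminates on the never-passed e ≤ 0, where Python recurses forever)
def pvMatPow (n : Int) (M : List (List Int)) (e : Int) : List (List Int) :=
  if e ≤ 1 then M
  else
    let H := pvMatPow n M (PySem.Int.floordiv e 2)
    let HH := pvCombine n H H
    if PySem.Int.mod e 2 == 0 then HH else pvCombine n HH M
termination_by e.toNat
decreasing_by
  rw [PySem.Int.floordiv_eq_ediv_of_pos (by omega : (0:Int) < 2)]
  omega

def autostrada_alt (T : List Int) (k : Int) : Int :=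
  let n : Int := T.length
  let P : List Int := T.foldl (fun acc t => acc ++ [PySem.List.pyGetD acc (-1) 0 + t]) [0]
  let M := (PySem.List.pyRange 0 (n + 1) 1).map (fun x =>
    (PySem.List.pyRange 0 (n + 1) 1).map (fun y =>
      PySem.List.pyGetD P y 0 - PySem.List.pyGetD P x 0))
  pvIx (pvMatPow n M k) 0 n

-- ===== PRECONDITION & SPEC =====
-- Pre_ excludes exactly the inputs where A raises: T = [] or k < 1 (IndexError on DP[0][0] / DP[k-1]).
def Pre_autostrada (T : List Int) (k : Int) : Prop := T ≠ [] ∧ 1 ≤ k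
instance (T : List Int) (k : Int) : Decidable (Pre_autostrada T k) := by unfold Pre_autostrada; infer_instance
def pvWitness_autostrada : List Int × Int := ([3, -1, 4], 2)

def Spec_autostrada (T : List Int) (k : Int) (out : Int) : Prop := out = autostrada_alt T k
instance (T : List Int) (k : Int) (out : Int) : Decidable (Spec_autostrada T k out) := by unfold Spec_autostrada; infer_instance

-- ===== CLAIM (what is proved, stated in full; the proofs are below) =====
def Claim_equal_autostrada : Prop := ∀ (T : List Int) (k : Int), Dom_autostrada T k → Pre_autostrada T k → Spec_autostrada T k (autostrada T k)

-- ===== LEMMAS AND PROOFS =====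

-- prefix sum: pvPre T j = sum of the first j elements
def pvPre (T : List Int) (j : ℕ) : Int := ((T.take j).sum : Int)

-- rmin f a c = min of f over the ℕ-interval [a, a+c]
def pvRmin (f : ℕ → Int) (a : ℕ) : ℕ → Int
  | 0 => f a
  | c + 1 => min (pvRmin f a c) (f (a + c + 1))

-- A's abstract DP: F T f s = DP[f][s] = best split of T[s:] into f+1 pieces (boundaries ≤ n-1)
def pvF (T : List Int) : ℕ → ℕ → Int
  | 0, s => pvPre T T.length - pvPre T s
  | f + 1, s => pvRmin (fun i => max (pvPre T i - pvPre T s) (pvF T f i)) s (T.length - 1 - s)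

-- abstract (min,max) power of the one-piece cost matrix: G T f x y = min over chains
-- x ≤ m1 ≤ … ≤ mf ≤ y of the max piece sum = (M^(f+1))[x][y]
def pvG (T : List Int) : ℕ → ℕ → ℕ → Int
  | 0, s, j => pvPre T j - pvPre T s
  | f + 1, s, j => pvRmin (fun m => max (pvG T f s m) (pvPre T j - pvPre T m)) s (j - s)

-- abstract (min,max) matrix product on the upper triangle
def pvComb (f g : ℕ → ℕ → Int) (x y : ℕ) : Int :=
  pvRmin (fun m => max (f x m) (g m y)) x (y - x)

theorem pvRmin_le (f : ℕ → Int) (a c i : ℕ) (h1 : a ≤ i) (h2 : i ≤ a + c) :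
    pvRmin f a c ≤ f i := by
  induction c with
  | zero =>
    have he : i = a := by omega
    subst he; exact le_of_eq rfl
  | succ c ih =>
    rw [pvRmin]
    rcases Nat.lt_or_ge i (a + c + 1) with h | h
    · exact le_trans (min_le_left _ _) (ih (by omega))
    · have : i = a + c + 1 := by omega
      subst this; exact min_le_right _ _

theorem le_pvRmin (f : ℕ → Int) (a c : ℕ) (x : Int) (h : ∀ i, a ≤ i → i ≤ a + c → x ≤ f i) :
    x ≤ pvRmin f a c := by
  induction c with
  | zero => exact h a (by omega) (by omega)
  | succ c ih =>
    rw [pvRmin]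
    exact le_min (ih (fun i h1 h2 => h i h1 (by omega))) (h _ (by omega) (by omega))

theorem pvRmin_congr (f g : ℕ → Int) (a c : ℕ) (h : ∀ i, a ≤ i → i ≤ a + c → f i = g i) :
    pvRmin f a c = pvRmin g a c := by
  induction c with
  | zero => exact h a (by omega) (by omega)
  | succ c ih =>
    rw [pvRmin, pvRmin, ih (fun i h1 h2 => h i h1 (by omega)), h _ (by omega) (by omega)]

theorem pvRmin_mono (f g : ℕ → Int) (a c : ℕ) (h : ∀ i, a ≤ i → i ≤ a + c → f i ≤ g i) :
    pvRmin f a c ≤ pvRmin g a c := by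
  apply le_pvRmin
  intro i h1 h2
  exact le_trans (pvRmin_le f a c i h1 h2) (h i h1 h2)

theorem pvRmin_max_left (f : ℕ → Int) (a c : ℕ) (x : Int) :
    max x (pvRmin f a c) = pvRmin (fun i => max x (f i)) a c := by
  induction c with
  | zero => rfl
  | succ c ih => rw [pvRmin, pvRmin, max_min_distrib_left, ih]

theorem pvRmin_max_right (f : ℕ → Int) (a c : ℕ) (x : Int) :
    max (pvRmin f a c) x = pvRmin (fun i => max (f i) x) a c := by
  rw [max_comm, pvRmin_max_left]
  exact pvRmin_congr _ _ _ _ (fun i _ _ => max_comm _ _)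

-- Fubini for min over the triangle a ≤ i ≤ m ≤ N
theorem pvRmin_swap (g : ℕ → ℕ → Int) (a N : ℕ) (h : a ≤ N) :
    pvRmin (fun i => pvRmin (fun m => g i m) i (N - i)) a (N - a)
      = pvRmin (fun m => pvRmin (fun i => g i m) a (m - a)) a (N - a) := by
  apply le_antisymm
  · apply le_pvRmin
    intro m h1 h2
    apply le_pvRmin
    intro i h3 h4
    calc pvRmin (fun i => pvRmin (fun m => g i m) i (N - i)) a (N - a)
        ≤ pvRmin (fun m => g i m) i (N - i) :=
          pvRmin_le _ _ _ _ (by omega) (by omega)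
      _ ≤ g i m := pvRmin_le _ _ _ _ (by omega) (by omega)
  · apply le_pvRmin
    intro i h1 h2
    apply le_pvRmin
    intro m h3 h4
    calc pvRmin (fun m => pvRmin (fun i => g i m) a (m - a)) a (N - a)
        ≤ pvRmin (fun i => g i m) a (m - a) :=
          pvRmin_le _ _ _ _ (by omega) (by omega)
      _ ≤ g i m := pvRmin_le _ _ _ _ (by omega) (by omega)

-- associativity core: M^(a+1) ∘ M^(b+1) = M^(a+b+2) on the upper triangle
theorem pvComb_pow (T : List Int) (b : ℕ) : ∀ (a : ℕ) (x y : ℕ), x ≤ y →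
    pvComb (pvG T a) (pvG T b) x y = pvG T (a + b + 1) x y := by
  induction b with
  | zero => intro a x y h; rfl
  | succ b ih =>
    intro a x y h
    calc pvComb (pvG T a) (pvG T (b + 1)) x y
        = pvRmin (fun m => pvRmin (fun j => max (pvG T a x m)
              (max (pvG T b m j) (pvPre T y - pvPre T j))) m (y - m)) x (y - x) := by
          apply pvRmin_congr
          intro m h1 h2
          show max (pvG T a x m)
              (pvRmin (fun j => max (pvG T b m j) (pvPre T y - pvPre T j)) m (y - m)) = _
          rw [pvRmin_max_left]
      _ = pvRmin (fun j => pvRmin (fun m => max (pvG T a x m)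
              (max (pvG T b m j) (pvPre T y - pvPre T j))) x (j - x)) x (y - x) :=
          pvRmin_swap (fun m j => max (pvG T a x m)
              (max (pvG T b m j) (pvPre T y - pvPre T j))) x y h
      _ = pvRmin (fun j => max (pvG T (a + b + 1) x j) (pvPre T y - pvPre T j)) x (y - x) := by
          apply pvRmin_congr
          intro j h1 h2
          have e1 : pvRmin (fun m => max (pvG T a x m)
              (max (pvG T b m j) (pvPre T y - pvPre T j))) x (j - x)
              = pvRmin (fun m => max (max (pvG T a x m) (pvG T b m j))
                  (pvPre T y - pvPre T j)) x (j - x) :=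
            pvRmin_congr _ _ _ _ (fun m _ _ => (max_assoc _ _ _).symm)
          rw [e1, ← pvRmin_max_right]
          show max (pvComb (pvG T a) (pvG T b) x j) _ = _
          rw [ih a x j h1]
      _ = pvG T (a + (b + 1) + 1) x y := by
          show _ = pvRmin (fun m => max (pvG T (a + b + 1) x m) (pvPre T y - pvPre T m)) x (y - x)
          rfl

-- peel-first equals peel-last on a segment [s, j]  (pvComb_pow with a = 0)
theorem pvGF' (T : List Int) (f : ℕ) : ∀ s j : ℕ, s ≤ j →
    pvRmin (fun i => max (pvPre T i - pvPre T s) (pvG T f i j)) s (j - s) = pvG T (f + 1) s j := by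
  intro s j h
  have := pvComb_pow T f 0 s j h
  rw [show (0 + f + 1) = f + 1 by omega] at this
  exact this

-- A's DP in terms of the abstract power
theorem pvFG (T : List Int) (f : ℕ) (hn : 1 ≤ T.length) : ∀ s : ℕ, s ≤ T.length - 1 →
    pvF T (f + 1) s
      = pvRmin (fun m => max (pvG T f s m) (pvPre T T.length - pvPre T m)) s (T.length - 1 - s) := by
  induction f with
  | zero => intro s h; rfl
  | succ f ih =>
    intro s h
    calc pvF T (f + 1 + 1) s
        = pvRmin (fun i => pvRmin (fun m => max (pvPre T i - pvPre T s)
              (max (pvG T f i m) (pvPre T T.length - pvPre T m))) i (T.length - 1 - i)) s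
              (T.length - 1 - s) := by
          apply pvRmin_congr
          intro i h1 h2
          show max (pvPre T i - pvPre T s) (pvF T (f + 1) i) = _
          rw [ih i (by omega), pvRmin_max_left]
      _ = pvRmin (fun m => pvRmin (fun i => max (pvPre T i - pvPre T s)
              (max (pvG T f i m) (pvPre T T.length - pvPre T m))) s (m - s)) s
              (T.length - 1 - s) :=
          pvRmin_swap (fun i m => max (pvPre T i - pvPre T s)
              (max (pvG T f i m) (pvPre T T.length - pvPre T m))) s (T.length - 1) h
      _ = pvRmin (fun m => max (pvG T (f + 1) s m) (pvPre T T.length - pvPre T m)) s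
              (T.length - 1 - s) := by
          apply pvRmin_congr
          intro m h1 h2
          have e1 : pvRmin (fun i => max (pvPre T i - pvPre T s)
              (max (pvG T f i m) (pvPre T T.length - pvPre T m))) s (m - s)
              = pvRmin (fun i => max (max (pvPre T i - pvPre T s) (pvG T f i m))
                  (pvPre T T.length - pvPre T m)) s (m - s) :=
            pvRmin_congr _ _ _ _ (fun i _ _ => (max_assoc _ _ _).symm)
          rw [e1, ← pvRmin_max_right, pvGF' T f s m h1]

-- ---- small utilities ----
theorem pvSum_eq (T : List Int) : pvSum T = T.sum := by
  have h : ∀ (l : List Int) (x : Int), l.foldl (· + ·) x = x + l.sum := by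
    intro l
    induction l with
    | nil => intro x; simp
    | cons a t ih => intro x; simp [List.foldl_cons, ih, add_assoc]
  simpa using h T 0

theorem pvPre_zero (T : List Int) : pvPre T 0 = 0 := rfl

theorem pvPre_len (T : List Int) : pvPre T T.length = T.sum := by
  simp [pvPre]

theorem pvPre_succ (T : List Int) (j : ℕ) (h : j < T.length) :
    pvPre T (j + 1) = pvPre T j + T[j] := List.sum_take_succ T j h

theorem pvMin_foldl (g : ℕ → Int) (a : ℕ) : ∀ c : ℕ,
    List.foldl min (g a) ((List.range' (a + 1) c).map g) = pvRmin g a c := by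
  intro c
  induction c with
  | zero => rfl
  | succ c ih =>
    have e : a + 1 + 1 * c = a + c + 1 := by omega
    rw [List.range'_concat, e, List.map_append, List.foldl_append, ih]
    rfl

theorem pvMin_map_range' (g : ℕ → Int) (a c : ℕ) :
    (PySem.List.min? ((List.range' a (c + 1)).map g) (fun x => x)).getD 0 = pvRmin g a c := by
  rw [List.range'_succ, List.map_cons, PySem.List.min?_id_cons, Option.getD_some]
  simpa using pvMin_foldl g a c

theorem pvFoldl_ignore {α β : Type} (f : β → β) : ∀ (l : List α) (init : β),
    l.foldl (fun b _ => f b) init = f^[l.length] init := by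
  intro l
  induction l with
  | nil => intro init; rfl
  | cons a t ih => intro init; simp [List.foldl_cons, ih, Function.iterate_succ_apply]

-- ---- port A characterized ----
theorem pvRow0_eq (T : List Int) (hn : 1 ≤ T.length) :
    pvRow0 T = (List.range T.length).map (fun s => pvF T 0 s) := by
  have main : ∀ m : ℕ, 1 ≤ m → m ≤ T.length →
      (PySem.List.pyRange 1 (m : Int) 1).foldl
        (fun row i => row ++ [PySem.List.pyGetD row (i - 1) 0 - PySem.List.pyGetD T (i - 1) 0])
        [pvSum T]
      = (List.range m).map (fun s => pvF T 0 s) := by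
    intro m
    induction m with
    | zero => intro h; omega
    | succ m ih =>
      intro _ hm
      rcases Nat.eq_zero_or_pos m with hm0 | hm1
      · subst hm0
        rw [show ((1 : ℕ) : Int) = 1 by norm_cast] at *
        rw [PySem.List.pyRange_one_eq_nil (by omega)]
        simp only [List.foldl_nil]
        rw [List.range_one]
        show [pvSum T] = [pvPre T T.length - pvPre T 0]
        rw [pvSum_eq, pvPre_len, pvPre_zero, sub_zero]
      · have hcast : ((m + 1 : ℕ) : Int) = (m : Int) + 1 := by push_cast; ring
        rw [hcast, PySem.List.pyRange_one_succ_right (by exact_mod_cast hm1),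
          List.foldl_append, ih hm1 (by omega)]
        simp only [List.foldl_cons, List.foldl_nil]
        have hm1' : ((m : Int) - 1) = ((m - 1 : ℕ) : Int) := by push_cast [hm1]; ring
        rw [hm1', PySem.List.pyGetD_natCast, PySem.List.pyGetD_natCast,
          PySem.List.getD_map_range _ _ _ _ (by omega), List.range_succ, List.map_append]
        congr 1
        show [pvF T 0 (m - 1) - T.getD (m - 1) 0] = [pvF T 0 m]
        have hlt : m - 1 < T.length := by omega
        rw [List.getD_eq_getElem?_getD, List.getElem?_eq_getElem hlt]
        show [pvPre T T.length - pvPre T (m - 1) - T[m - 1]] = [pvPre T T.length - pvPre T m]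
        have := pvPre_succ T (m - 1) hlt
        rw [show m - 1 + 1 = m by omega] at this
        rw [this]
        congr 1
        ring
  simpa using main T.length hn (le_refl _)

theorem pvLiczFold (T prev : List Int) (j : ℕ) : ∀ m : ℕ, j ≤ m → m ≤ T.length →
    (PySem.List.pyRange (j : Int) (m : Int) 1).foldl
      (fun (st : List Int × Int) i =>
        (st.1 ++ [max st.2 (PySem.List.pyGetD prev i 0)], st.2 + PySem.List.pyGetD T i 0))
      ([], 0)
    = ((List.range' j (m - j)).map (fun i => max (pvPre T i - pvPre T j) (prev.getD i 0)),
        pvPre T m - pvPre T j) := by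
  intro m
  induction m with
  | zero =>
    intro h1 _
    have : j = 0 := by omega
    subst this
    rw [PySem.List.pyRange_one_eq_nil (by omega)]
    simp
  | succ m ih =>
    intro h1 h2
    rcases Nat.lt_or_ge m j with hlt | hge
    · have : j = m + 1 := by omega
      subst this
      rw [PySem.List.pyRange_one_eq_nil (by omega)]
      simp
    · have hcast : ((m + 1 : ℕ) : Int) = (m : Int) + 1 := by push_cast; ring
      rw [hcast, PySem.List.pyRange_one_succ_right (by exact_mod_cast hge),
        List.foldl_append, ih hge (by omega)]
      simp only [List.foldl_cons, List.foldl_nil]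
      rw [PySem.List.pyGetD_natCast, PySem.List.pyGetD_natCast, Prod.mk.injEq]
      refine ⟨?_, ?_⟩
      · rw [show m + 1 - j = (m - j) + 1 by omega, List.range'_concat, List.map_append]
        congr 2
        rw [show j + 1 * (m - j) = m by omega]
      · rw [List.getD_eq_getElem?_getD, List.getElem?_eq_getElem (by omega : m < T.length),
          Option.getD_some, pvPre_succ T m (by omega)]
        ring

theorem pvLicz_eq (T prev : List Int) (j : ℕ) (hj : j < T.length) :
    pvLicz T prev (j : Int)
      = pvRmin (fun i => max (pvPre T i - pvPre T j) (prev.getD i 0)) j (T.length - 1 - j) := by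
  show (PySem.List.min? ((PySem.List.pyRange (j : Int) (T.length : Int) 1).foldl
      (fun (st : List Int × Int) i =>
        (st.1 ++ [max st.2 (PySem.List.pyGetD prev i 0)], st.2 + PySem.List.pyGetD T i 0))
      ([], 0)).1 (fun x => x)).getD 0 = _
  rw [pvLiczFold T prev j T.length (by omega) (by omega)]
  show (PySem.List.min? ((List.range' j (T.length - j)).map _) (fun x => x)).getD 0 = _
  rw [show T.length - j = (T.length - 1 - j) + 1 by omega]
  exact pvMin_map_range' _ j (T.length - 1 - j)

theorem pvLayer_eq (T prev : List Int) :
    (PySem.List.pyRange 0 (T.length : Int) 1).foldl (fun row j => row ++ [pvLicz T prev j]) []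
      = (List.range T.length).map (fun (j : ℕ) => pvLicz T prev (j : Int)) := by
  rw [PySem.List.pyRange_zero_natCast, PySem.List.foldl_append_singleton_eq_map, List.map_map]
  simp

theorem pvLayer_F (T : List Int) (f : ℕ) :
    (PySem.List.pyRange 0 (T.length : Int) 1).foldl
        (fun row j => row ++ [pvLicz T ((List.range T.length).map (fun s => pvF T f s)) j]) []
      = (List.range T.length).map (fun s => pvF T (f + 1) s) := by
  rw [pvLayer_eq]
  apply List.map_congr_left
  intro j hj
  rw [List.mem_range] at hj
  rw [pvLicz_eq T _ j hj]
  show pvRmin _ j (T.length - 1 - j) = pvRmin _ j (T.length - 1 - j)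
  apply pvRmin_congr
  intro i h1 h2
  rw [PySem.List.getD_map_range _ _ _ _ (by omega)]

theorem pvIter_F (T : List Int) : ∀ t : ℕ,
    (fun prev => (PySem.List.pyRange 0 (T.length : Int) 1).foldl
        (fun row j => row ++ [pvLicz T prev j]) [])^[t]
        ((List.range T.length).map (fun s => pvF T 0 s))
      = (List.range T.length).map (fun s => pvF T t s) := by
  intro t
  induction t with
  | zero => rfl
  | succ t ih => rw [Function.iterate_succ_apply', ih, pvLayer_F T t]

theorem pvAutostrada_eq (T : List Int) (k : Int) (hn : 1 ≤ T.length) :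
    autostrada T k = pvF T (k - 1).toNat 0 := by
  show PySem.List.pyGetD
      ((PySem.List.pyRange 1 k 1).foldl
        (fun prev _ => (PySem.List.pyRange 0 (T.length : Int) 1).foldl
          (fun row j => row ++ [pvLicz T prev j]) [])
        (pvRow0 T)) 0 0 = _
  rw [pvFoldl_ignore, PySem.List.length_pyRange_one, pvRow0_eq T hn, pvIter_F T,
    PySem.List.pyGetD_zero, List.getD_eq_getElem?_getD,
    List.getElem?_eq_getElem (by simpa using hn), List.getElem_map]
  simp

-- ---- port B characterized ----
theorem pvPlist (T : List Int) :
    T.foldl (fun acc t => acc ++ [PySem.List.pyGetD acc (-1) 0 + t]) [0]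
      = (List.range (T.length + 1)).map (fun (j : ℕ) => pvPre T j) := by
  induction T using List.reverseRecOn with
  | nil => rfl
  | append_singleton T t ih =>
    rw [List.foldl_append, ih, List.foldl_cons, List.foldl_nil]
    rw [List.range_succ (n := T.length), List.map_append, List.map_singleton,
      PySem.List.pyGetD_neg_one_append_singleton]
    rw [List.length_append, List.length_singleton, List.range_succ (n := T.length + 1),
      List.map_append]
    congr 1
    · rw [List.range_succ, List.map_append, List.map_singleton]
      congr 1
      · apply List.map_congr_left
        intro j hj
        rw [List.mem_range] at hj
        show pvPre T j = pvPre (T ++ [t]) j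
        unfold pvPre
        rw [List.take_append_of_le_length (by omega)]
      · show [pvPre T T.length] = [pvPre (T ++ [t]) T.length]
        unfold pvPre
        rw [List.take_append_of_le_length (by omega)]
    · show [pvPre T T.length + t] = [pvPre (T ++ [t]) (T.length + 1)]
      unfold pvPre
      rw [List.take_length, List.take_of_length_le (by simp), List.sum_append]
      simp

-- "Q is the (n+1)×(n+1) upper-triangular representation of f"
def pvRepr (n : ℕ) (Q : List (List Int)) (f : ℕ → ℕ → Int) : Prop :=
  ∀ x y : ℕ, x ≤ y → y ≤ n → pvIx Q (x : Int) (y : Int) = f x y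

theorem pvRepr_ext (n : ℕ) (Q : List (List Int)) (f g : ℕ → ℕ → Int)
    (h : pvRepr n Q f) (hfg : ∀ x y : ℕ, x ≤ y → y ≤ n → f x y = g x y) : pvRepr n Q g := by
  intro x y h1 h2
  rw [h x y h1 h2, hfg x y h1 h2]

-- reading one entry of a map-of-map square matrix
theorem pvIx_map (n : ℕ) (g : Int → Int → Int) (x y : ℕ) (hx : x ≤ n) (hy : y ≤ n) :
    pvIx ((PySem.List.pyRange 0 ((n : Int) + 1) 1).map (fun a =>
        (PySem.List.pyRange 0 ((n : Int) + 1) 1).map (fun b => g a b))) (x : Int) (y : Int)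
      = g (x : Int) (y : Int) := by
  have hcast : ((n : Int) + 1) = ((n + 1 : ℕ) : Int) := by push_cast; ring
  unfold pvIx
  rw [hcast, PySem.List.pyRange_zero_natCast, List.map_map,
    PySem.List.pyGetD_natCast, PySem.List.pyGetD_natCast,
    PySem.List.getD_map_range _ _ _ _ (by omega : x < n + 1)]
  show (List.map (fun b => g (x : Int) b) (List.map (fun (j : ℕ) => (j : Int))
      (List.range (n + 1)))).getD y 0 = _
  rw [List.map_map, PySem.List.getD_map_range _ _ _ _ (by omega : y < n + 1)]
  rfl

-- min over pyRange x (y+1) of h = pvRmin of h∘cast over [x, y]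
theorem pvMin_pyRange (h : Int → Int) (x y : ℕ) (hxy : x ≤ y) :
    (PySem.List.min? ((PySem.List.pyRange (x : Int) ((y : Int) + 1) 1).map h) (fun z => z)).getD 0
      = pvRmin (fun m : ℕ => h (m : Int)) x (y - x) := by
  rw [PySem.List.pyRange_one, List.map_map]
  have hc : (((y : Int) + 1 - (x : Int))).toNat = (y - x) + 1 := by omega
  rw [hc]
  have he : (List.range ((y - x) + 1)).map (h ∘ (fun (k : ℕ) => (x : Int) + (k : Int)))
      = (List.range' x ((y - x) + 1)).map (fun m : ℕ => h (m : Int)) := by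
    rw [List.range'_eq_map_range, List.map_map]
    apply List.map_congr_left
    intro j hj
    show h ((x : Int) + (j : Int)) = h (((x + j : ℕ) : Int))
    push_cast
    rfl
  rw [he, pvMin_map_range']

theorem pvCombine_repr (n : ℕ) (A B : List (List Int)) (f g : ℕ → ℕ → Int)
    (hA : pvRepr n A f) (hB : pvRepr n B g) :
    pvRepr n (pvCombine (n : Int) A B) (pvComb f g) := by
  intro x y hxy hy
  unfold pvCombine
  rw [pvIx_map n _ x y (by omega) hy]
  rw [if_pos (by exact_mod_cast hxy)]
  rw [pvMin_pyRange _ x y hxy]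
  unfold pvComb
  apply pvRmin_congr
  intro m h1 h2
  rw [hA x m h1 (by omega), hB m y (by omega) hy]

-- matpow(M, e) represents M^e = pvG (e-1)
theorem pvMatPow_repr (T : List Int) (M0 : List (List Int))
    (h0 : pvRepr T.length M0 (pvG T 0)) :
    ∀ e : ℕ, 1 ≤ e → pvRepr T.length (pvMatPow (T.length : Int) M0 (e : Int)) (pvG T (e - 1)) := by
  intro e
  induction e using Nat.strong_induction_on with
  | _ e ih =>
    intro he
    rw [pvMatPow]
    rcases Nat.eq_or_lt_of_le he with he1 | he2
    · rw [if_pos (by rw [← he1]; norm_num)]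
      rw [← he1]
      exact h0
    · rw [if_neg (by omega)]
      have hdiv : PySem.Int.floordiv (e : Int) 2 = ((e / 2 : ℕ) : Int) :=
        PySem.Int.floordiv_natCast e 2
      rw [hdiv]
      have hH := ih (e / 2) (by omega) (by omega)
      have hHH := pvCombine_repr T.length _ _ _ _ hH hH
      have hHH' : pvRepr T.length
          (pvCombine (T.length : Int) (pvMatPow (T.length : Int) M0 ((e / 2 : ℕ) : Int))
            (pvMatPow (T.length : Int) M0 ((e / 2 : ℕ) : Int)))
          (pvG T (2 * (e / 2) - 1)) := by
        refine pvRepr_ext _ _ _ _ hHH ?_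
        intro x y h1 h2
        rw [pvComb_pow T (e / 2 - 1) (e / 2 - 1) x y h1,
          show e / 2 - 1 + (e / 2 - 1) + 1 = 2 * (e / 2) - 1 by omega]
      have hmod : PySem.Int.mod (e : Int) 2 = ((e % 2 : ℕ) : Int) := PySem.Int.mod_natCast e 2
      rcases Nat.even_or_odd e with hev | hod
      · have h2 : e % 2 = 0 := Nat.even_iff.mp hev
        rw [hmod, h2, Nat.cast_zero, if_pos (by decide)]
        exact pvRepr_ext _ _ _ _ hHH'
          (fun x y h1 h2' => by rw [show 2 * (e / 2) - 1 = e - 1 by omega])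
      · have h2 : e % 2 = 1 := Nat.odd_iff.mp hod
        rw [hmod, h2, Nat.cast_one, if_neg (by decide)]
        exact pvRepr_ext _ _ _ _ (pvCombine_repr T.length _ _ _ _ hHH' h0)
          (fun x y h1 h2' => by
            rw [pvComb_pow T 0 (2 * (e / 2) - 1) x y h1,
              show 2 * (e / 2) - 1 + 0 + 1 = e - 1 by omega])

theorem pvAlt_eq (T : List Int) (k : Int) (hk : 1 ≤ k) :
    autostrada_alt T k = pvG T (k.toNat - 1) 0 T.length := by
  unfold autostrada_alt
  have hP := pvPlist T
  have h0 : pvRepr T.length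
      ((PySem.List.pyRange 0 ((T.length : Int) + 1) 1).map (fun x =>
        (PySem.List.pyRange 0 ((T.length : Int) + 1) 1).map (fun y =>
          PySem.List.pyGetD (T.foldl (fun acc t => acc ++ [PySem.List.pyGetD acc (-1) 0 + t]) [0]) y 0
          - PySem.List.pyGetD (T.foldl (fun acc t => acc ++ [PySem.List.pyGetD acc (-1) 0 + t]) [0]) x 0)))
      (pvG T 0) := by
    intro x y hxy hy
    rw [pvIx_map T.length _ x y (by omega) hy, hP, PySem.List.pyGetD_natCast,
      PySem.List.pyGetD_natCast, PySem.List.getD_map_range _ _ _ _ (by omega),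
      PySem.List.getD_map_range _ _ _ _ (by omega)]
    rfl
  have hrepr := pvMatPow_repr T _ h0 k.toNat (by omega)
  have hkk : ((k.toNat : ℕ) : Int) = k := by omega
  rw [hkk] at hrepr
  exact hrepr 0 T.length (by omega) (le_refl _)

-- ---- the top entry: free last boundary equals A's boundary capped at n-1 ----
theorem pvG_diag (T : List Int) : ∀ f s, pvG T f s s = 0 := by
  intro f
  induction f with
  | zero => intro s; exact sub_self _
  | succ f ih =>
    intro s
    show pvRmin (fun m => max (pvG T f s m) (pvPre T s - pvPre T m)) s (s - s) = 0
    rw [Nat.sub_self]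
    show max (pvG T f s s) (pvPre T s - pvPre T s) = 0
    rw [ih s, sub_self, max_self]

theorem pvG_le_max (T : List Int) (f m : ℕ) : pvG T (f + 1) 0 m ≤ max (pvG T f 0 m) 0 := by
  have h := pvRmin_le (fun i => max (pvG T f 0 i) (pvPre T m - pvPre T i)) 0 (m - 0) m
    (by omega) (by omega)
  calc pvG T (f + 1) 0 m ≤ max (pvG T f 0 m) (pvPre T m - pvPre T m) := h
    _ = max (pvG T f 0 m) 0 := by rw [sub_self]

-- split the last min of pvG (f+1) 0 n at m = n
theorem pvG_split (T : List Int) (f : ℕ) (hn : 1 ≤ T.length) :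
    pvG T (f + 1) 0 T.length
      = min (pvRmin (fun m => max (pvG T f 0 m) (pvPre T T.length - pvPre T m)) 0 (T.length - 1))
          (max (pvG T f 0 T.length) 0) := by
  show pvRmin (fun m => max (pvG T f 0 m) (pvPre T T.length - pvPre T m)) 0 (T.length - 0) = _
  rw [show T.length - 0 = (T.length - 1) + 1 by omega]
  rw [pvRmin]
  congr 1
  rw [show 0 + (T.length - 1) + 1 = T.length by omega, sub_self]

theorem pvG_top_ge (T : List Int) (hn : 1 ≤ T.length) : ∀ f : ℕ,
    pvRmin (fun m => max (pvG T f 0 m) (pvPre T T.length - pvPre T m)) 0 (T.length - 1)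
      ≤ max (pvG T f 0 T.length) 0 := by
  intro f
  induction f with
  | zero =>
    have h := pvRmin_le (fun m => max (pvG T 0 0 m) (pvPre T T.length - pvPre T m)) 0
      (T.length - 1) 0 (by omega) (by omega)
    calc pvRmin _ 0 (T.length - 1) ≤ max (pvG T 0 0 0) (pvPre T T.length - pvPre T 0) := h
      _ = max 0 (pvPre T T.length - 0) := by rw [pvG_diag, pvPre_zero]
      _ = max (pvG T 0 0 T.length) 0 := by
          rw [max_comm]
          show max (pvPre T T.length - 0) 0 = max (pvPre T T.length - pvPre T 0) 0
          rw [pvPre_zero]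
  | succ f ih =>
    -- R (f+1) ≤ max (R f) 0  and  R (f+1) ≤ max (pvG f 0 n) 0
    have ha : pvRmin (fun m => max (pvG T (f + 1) 0 m) (pvPre T T.length - pvPre T m)) 0
        (T.length - 1)
        ≤ max (pvRmin (fun m => max (pvG T f 0 m) (pvPre T T.length - pvPre T m)) 0
            (T.length - 1)) 0 := by
      rw [pvRmin_max_right]
      apply pvRmin_mono
      intro m h1 h2
      calc max (pvG T (f + 1) 0 m) (pvPre T T.length - pvPre T m)
          ≤ max (max (pvG T f 0 m) 0) (pvPre T T.length - pvPre T m) :=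
            max_le_max (pvG_le_max T f m) (le_refl _)
        _ = max (max (pvG T f 0 m) (pvPre T T.length - pvPre T m)) 0 := max_right_comm _ _ _
    have hb : pvRmin (fun m => max (pvG T (f + 1) 0 m) (pvPre T T.length - pvPre T m)) 0
        (T.length - 1) ≤ max (pvG T f 0 T.length) 0 := by
      refine le_trans ha ?_
      exact max_le (le_trans ih (le_refl _)) (le_max_right _ _)
    rw [pvG_split T f hn]
    rw [max_comm (min _ _) 0, max_min_distrib_left, max_comm 0 _, max_comm 0 _]
    refine le_min (le_trans ha ?_) ?_
    · exact le_refl _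
    · rw [max_assoc, max_self]
      exact hb

theorem pvG_top (T : List Int) (f : ℕ) (hn : 1 ≤ T.length) :
    pvG T (f + 1) 0 T.length
      = pvRmin (fun m => max (pvG T f 0 m) (pvPre T T.length - pvPre T m)) 0 (T.length - 1) := by
  rw [pvG_split T f hn]
  exact min_eq_left (pvG_top_ge T hn f)

-- ===== VERDICT (by name: the statement is the Claim_ definition above) =====
theorem autostrada_spec : Claim_equal_autostrada := by
  unfold Claim_equal_autostrada
  intro T k _ hpre
  obtain ⟨hT, hk⟩ := hpre
  have hn : 1 ≤ T.length := List.length_pos_iff.mpr hT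
  unfold Spec_autostrada
  rw [pvAutostrada_eq T k hn, pvAlt_eq T k hk]
  rcases eq_or_lt_of_le hk with hk1 | hk2
  · -- k = 1: both sides are sum(T) = P n - P 0
    rw [← hk1]
    show pvF T 0 0 = pvG T 0 0 T.length
    rfl
  · -- k ≥ 2
    rw [show (k - 1).toNat = (k - 2).toNat + 1 by omega,
      show k.toNat - 1 = (k - 2).toNat + 1 by omega,
      pvFG T (k - 2).toNat hn 0 (by omega), pvG_top T (k - 2).toNat hn]
    rfl
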